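-- pv_equiv track=rewrite | github.com/icellan/runar | packages/runar-py/runar/sdk/state.py | _unwrap_fixed_array_leaf
-- ===== SOURCE A (Python) =====
-- def _unwrap_fixed_array_leaf(type_str: str) -> str:
--     """Return the innermost scalar type of a nested FixedArray string."""
--     current = type_str.strip()
--     while current.startswith("FixedArray<"):
--         inner = current[len("FixedArray<"):-1]
--         depth = 0
--         split_at = -1
--         for i in range(len(inner) - 1, -1, -1):
--             ch = inner[i]
--             if ch == ">":
--                 depth += 1
--             elif ch == "<":
--                 depth -= 1
--             elif ch == "," and depth == 0:
--                 split_at = i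
--                 break
--         if split_at < 0:
--             return current
--         current = inner[:split_at].strip()
--     return current
-- ===== SOURCE B (Python) =====
-- def _last_top_comma_from_right(chars, depth):
--     """Offset (from the right end) of the first depth-0 comma met while
--     walking the reversed character list; None if there is none."""
--     if not chars:
--         return None
--     ch = chars[0]
--     if ch == ">":
--         r = _last_top_comma_from_right(chars[1:], depth + 1)
--     elif ch == "<":
--         r = _last_top_comma_from_right(chars[1:], depth - 1)
--     elif ch == "," and depth == 0:
--         return 0
--     else:
--         r = _last_top_comma_from_right(chars[1:], depth)
--     return None if r is None else r + 1
--
--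
-- def _unwrap_fixed_array_leaf(type_str: str) -> str:
--     current = type_str.strip()
--     if not current.startswith("FixedArray<"):
--         return current
--     inner = current[len("FixedArray<"):-1]
--     k = _last_top_comma_from_right(list(reversed(inner)), 0)
--     if k is None:
--         return current
--     return _unwrap_fixed_array_leaf(inner[:len(inner) - 1 - k])
-- ===== Notes on version B (the rewrite author's own statement) =====
-- stated objective: alternative
-- what changed: A's iterative while-loop with an index-based backward for-scan is replaced by structural recursion: tail recursion on the nested type for the layer stripping, and recursion over the reversed character list (returning an Option offset from the right) for the top-level-comma search.
import Mathlib
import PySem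

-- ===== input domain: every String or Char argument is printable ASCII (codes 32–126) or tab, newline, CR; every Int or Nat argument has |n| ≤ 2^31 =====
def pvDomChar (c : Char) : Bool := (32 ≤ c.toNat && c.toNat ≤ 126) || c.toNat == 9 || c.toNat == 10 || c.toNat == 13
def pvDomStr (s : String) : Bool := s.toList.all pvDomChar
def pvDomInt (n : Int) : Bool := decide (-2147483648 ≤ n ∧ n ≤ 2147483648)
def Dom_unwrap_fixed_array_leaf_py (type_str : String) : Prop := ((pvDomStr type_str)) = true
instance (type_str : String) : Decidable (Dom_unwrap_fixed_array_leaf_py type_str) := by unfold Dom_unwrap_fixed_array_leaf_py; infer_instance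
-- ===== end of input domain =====

-- B replaces A's iterative layer-stripping loop and index-based backward scan by structural
-- recursion: on the nested type for the unwrapping, and on the reversed character list for the
-- top-level-comma search (objective: alternative decomposition, same cost).

-- ===== PORT A =====
-- inner = current[len("FixedArray<"):-1], shared by both ports
def pvInner (current : List Char) : List Char :=
  PySem.List.slice current (some 11) (some (-1))

-- A's inner 'for i in range(len(inner)-1, -1, -1)' loop: i counts down, returning split_at
-- (an Int, -1 when no top-level comma is found).  'inner.getD j' is exact: j < inner.length.
def pvScanA (inner : List Char) : Nat → Int → Int
  | 0, _ => -1
  | Nat.succ j, depth =>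
    let ch := inner.getD j ' '
    if ch = '>' then pvScanA inner j (depth + 1)
    else if ch = '<' then pvScanA inner j (depth - 1)
    else if ch = ',' ∧ depth = 0 then (j : Int)
    else pvScanA inner j depth

-- A's 'while' loop; fuel only makes the loop total (each iteration strictly shrinks current,
-- so type_str.toList.length + 1 steps always suffice).
def pvLoopA (fuel : Nat) (current : List Char) : List Char :=
  match fuel with
  | 0 => current
  | Nat.succ f =>
    if PySem.Chars.startswith current "FixedArray<".toList then
      -- inner = current[11:-1]; split_at = result of the backward scan over all of inner
      if pvScanA (pvInner current) (pvInner current).length 0 < 0 then current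
      else pvLoopA f (PySem.Chars.strip (PySem.List.slice (pvInner current) none
        (some (pvScanA (pvInner current) (pvInner current).length 0))))
    else current

def unwrap_fixed_array_leaf_py (type_str : String) : String :=
  String.ofList (pvLoopA (type_str.toList.length + 1) (PySem.Chars.strip type_str.toList))

-- ===== PORT B =====
-- Source B's _last_top_comma_from_right: recursion over the reversed character list; 'some k' is
-- the offset (from the right end) of the first depth-0 comma.
def pvScanB : List Char → Int → Option Nat
  | [], _ => none
  | ch :: rest, depth =>
    if ch = '>' then (pvScanB rest (depth + 1)).map (· + 1)
    else if ch = '<' then (pvScanB rest (depth - 1)).map (· + 1)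
    else if ch = ',' ∧ depth = 0 then some 0
    else (pvScanB rest depth).map (· + 1)

-- cited by pvRecB's decreasing_by
theorem pvStripLen (s : List Char) : (PySem.Chars.strip s).length ≤ s.length := by
  have h1 := (List.dropWhile_sublist (p := PySem.Chars.isspace)
    (l := (List.dropWhile PySem.Chars.isspace s).reverse)).length_le
  have h2 := (List.dropWhile_sublist (p := PySem.Chars.isspace) (l := s)).length_le
  simp [PySem.Chars.strip, PySem.Chars.rstrip, PySem.Chars.lstrip] at *
  omega

-- cited by pvRecB's decreasing_by
theorem pvInnerLen (current : List Char) (h : 11 ≤ current.length) :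
    (pvInner current).length = current.length - 12 := by
  rw [pvInner, PySem.List.length_slice, PySem.List.clampIdx_neg_one]
  have : PySem.List.clampIdx current.length 11 = 11 := by
    simp [PySem.List.clampIdx]; omega
  omega

-- Source B's _unwrap_fixed_array_leaf: tail recursion on the nested type.
def pvRecB (current : List Char) : List Char :=
  if PySem.Chars.startswith current "FixedArray<".toList then
    match pvScanB (pvInner current).reverse 0 with
    | none => current
    | some k =>
      pvRecB (PySem.Chars.strip ((pvInner current).take ((pvInner current).length - 1 - k)))
  else current
termination_by current.length
decreasing_by
  have hsw : ("FixedArray<".toList) <+: current := by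
    rwa [← PySem.Chars.startswith_iff]
  have hlen : 11 ≤ current.length := by
    have := hsw.length_le; simpa using this
  have hinner := pvInnerLen current hlen
  have h2 := pvStripLen ((pvInner current).take ((pvInner current).length - 1 - k))
  have h3 := List.length_take_le ((pvInner current).length - 1 - k) (pvInner current)
  omega

def unwrap_fixed_array_leaf_py_alt (type_str : String) : String :=
  String.ofList (pvRecB (PySem.Chars.strip type_str.toList))

-- ===== PRECONDITION & SPEC =====
def Spec_unwrap_fixed_array_leaf_py (type_str : String) (out : String) : Prop := out = unwrap_fixed_array_leaf_py_alt type_str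
instance (type_str : String) (out : String) : Decidable (Spec_unwrap_fixed_array_leaf_py type_str out) := by unfold Spec_unwrap_fixed_array_leaf_py; infer_instance

-- ===== CLAIM (what is proved, stated in full; the proofs are below) =====
def Claim_equal_unwrap_fixed_array_leaf_py : Prop := ∀ (type_str : String), Dom_unwrap_fixed_array_leaf_py type_str → Spec_unwrap_fixed_array_leaf_py type_str (unwrap_fixed_array_leaf_py type_str)

-- ===== LEMMAS AND PROOFS =====
-- A's downward index scan and B's recursion over the reversed list find the same comma:
-- scanA over the first i characters is -1 or i-1-k according as scanB on their reversal is none or some k.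
theorem pvScan_agree (inner : List Char) (i : Nat) (hi : i ≤ inner.length) (d : Int) :
    pvScanA inner i d =
      match pvScanB ((inner.take i).reverse) d with
      | none => -1
      | some k => ((i - 1 - k : Nat) : Int) := by
  induction i generalizing d with
  | zero => simp [pvScanA, pvScanB]
  | succ j ih =>
    have hj : j < inner.length := by omega
    have htake : (inner.take (j + 1)).reverse = inner[j] :: (inner.take j).reverse := by
      rw [List.take_add_one]
      simp [List.getElem?_eq_getElem hj]
    have hget : inner.getD j ' ' = inner[j] := List.getD_eq_getElem inner ' ' hj
    rw [htake]
    simp only [pvScanA, pvScanB, hget]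
    split_ifs with h1 h2 h3
    · rw [ih (by omega)]
      cases h : pvScanB ((inner.take j).reverse) (d + 1) <;> simp [Nat.sub_sub] <;> omega
    · rw [ih (by omega)]
      cases h : pvScanB ((inner.take j).reverse) (d - 1) <;> simp [Nat.sub_sub] <;> omega
    · simp
    · rw [ih (by omega)]
      cases h : pvScanB ((inner.take j).reverse) d <;> simp [Nat.sub_sub] <;> omega

theorem pvLoop_eq_rec (f : Nat) :
    ∀ current : List Char, current.length < f → pvLoopA f current = pvRecB current := by
  induction f with
  | zero => intro c h; omega
  | succ g ih =>
    intro current hlt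
    rw [pvLoopA, pvRecB.eq_def]
    by_cases hsw : PySem.Chars.startswith current "FixedArray<".toList
    · rw [if_pos hsw, if_pos hsw]
      have hscan := pvScan_agree (pvInner current) (pvInner current).length (le_refl _) 0
      rw [List.take_length] at hscan
      cases hh : pvScanB (pvInner current).reverse 0 with
      | none =>
        have hscan' : pvScanA (pvInner current) (pvInner current).length 0 = -1 := by
          rw [hscan, hh]
        rw [hscan']
        norm_num
      | some k =>
        have hscan' : pvScanA (pvInner current) (pvInner current).length 0
            = (((pvInner current).length - 1 - k : Nat) : Int) := by
          rw [hscan, hh]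
        rw [hscan', if_neg (Int.not_lt.mpr (Int.natCast_nonneg _))]
        have hpre : ("FixedArray<".toList) <+: current := (PySem.Chars.startswith_iff _ _).mp hsw
        have hclen : 11 ≤ current.length := by have := hpre.length_le; simpa using this
        have hilen := pvInnerLen current hclen
        have hslice : PySem.List.slice (pvInner current) none
              (some (((pvInner current).length - 1 - k : Nat) : Int))
            = (pvInner current).take ((pvInner current).length - 1 - k) := by
          rw [PySem.List.slice_to _ (Int.natCast_nonneg _)]
          simp
        rw [hslice]
        exact ih _ (by
          have h2 := pvStripLen ((pvInner current).take ((pvInner current).length - 1 - k))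
          have h3 := List.length_take_le ((pvInner current).length - 1 - k) (pvInner current)
          omega)
    · rw [if_neg hsw, if_neg hsw]

-- ===== VERDICT (by name: the statement is the Claim_ definition above) =====
theorem unwrap_fixed_array_leaf_py_spec : Claim_equal_unwrap_fixed_array_leaf_py := by
  intro type_str _
  unfold Spec_unwrap_fixed_array_leaf_py unwrap_fixed_array_leaf_py unwrap_fixed_array_leaf_py_alt
  congr 1
  apply pvLoop_eq_rec
  have := pvStripLen type_str.toList
  omega
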